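-- pv_equiv track=rewrite | github.com/adityapandey9165/DSA-Pattern-Based-Solutions | python/bit_manipulation/easy/LeetCode: 693. Binary Number with Alternating Bits (Easy).py | hasAlternatingBits_iter
-- ===== SOURCE A (Python) =====
-- def hasAlternatingBits_iter(n: int) -> bool:
--     prev = n & 1
--     n >>= 1
--     while n:
--         cur = n & 1
--         if cur == prev:
--             return False
--         prev = cur
--         n >>= 1
--     return True
-- ===== SOURCE B (Python) =====
-- def hasAlternatingBits_iter(n: int) -> bool:
--     if n < 0:
--         return False
--     x = n ^ (n >> 1)
--     return x & (x + 1) == 0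
-- ===== Notes on version B (the rewrite author's own statement) =====
-- stated objective: idiomatic
-- what changed: A's bit-by-bit while loop comparing each bit to the previous one is replaced by the closed-form bit trick x = n ^ (n >> 1); x & (x + 1) == 0 (with a negative guard, since A returns False for every negative n).
import Mathlib
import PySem

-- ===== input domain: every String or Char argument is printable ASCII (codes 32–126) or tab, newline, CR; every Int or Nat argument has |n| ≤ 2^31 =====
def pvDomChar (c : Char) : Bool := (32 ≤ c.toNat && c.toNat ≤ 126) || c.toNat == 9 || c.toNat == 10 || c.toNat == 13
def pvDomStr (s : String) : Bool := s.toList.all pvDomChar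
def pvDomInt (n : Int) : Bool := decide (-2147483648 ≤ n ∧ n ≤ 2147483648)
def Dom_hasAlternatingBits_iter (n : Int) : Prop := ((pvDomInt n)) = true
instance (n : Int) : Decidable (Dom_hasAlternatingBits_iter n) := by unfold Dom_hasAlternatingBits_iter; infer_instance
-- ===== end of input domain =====

-- B replaces A's bit-by-bit while loop with the closed-form trick x = n ^ (n >> 1); x & (x+1) == 0
-- (after a negative guard, since A returns False for every negative n); equivalence proved for all Int.

-- ===== PORT A =====
-- A's while loop: state (prev, n). It terminates for every n (negative n stabilises at -1, whose bits repeat),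
-- so the fuel pvMeasA prev n + 1 is a pure totality guard: the 0-fuel branch is never reached (proved below).
def pvMeasA (prev n : Int) : Nat :=
  if 0 ≤ n then n.toNat else 2 * (-(n + 1)).toNat + (if prev = 1 then 1 else 2)

def pvLoopA (fuel : Nat) (prev n : Int) : Bool :=
  match fuel with
  | 0 => true
  | fuel + 1 =>
    if n = 0 then true
    else if PySem.Int.band n 1 = prev then false       -- cur = n & 1; if cur == prev: return False
    else pvLoopA fuel (PySem.Int.band n 1) (n >>> (1 : Nat))   -- prev = cur; n >>= 1

def hasAlternatingBits_iter (n : Int) : Bool :=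
  pvLoopA (pvMeasA (PySem.Int.band n 1) (n >>> (1 : Nat)) + 1)
    (PySem.Int.band n 1) (n >>> (1 : Nat))

-- ===== PORT B =====
def hasAlternatingBits_iter_alt (n : Int) : Bool :=
  if n < 0 then false
  else
    let x := PySem.Int.bxor n (n >>> (1 : Nat))
    PySem.Int.band x (x + 1) == 0

-- ===== PRECONDITION & SPEC =====
def Spec_hasAlternatingBits_iter (n : Int) (out : Bool) : Prop := out = hasAlternatingBits_iter_alt n
instance (n : Int) (out : Bool) : Decidable (Spec_hasAlternatingBits_iter n out) := by unfold Spec_hasAlternatingBits_iter; infer_instance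

-- ===== CLAIM (what is proved, stated in full; the proofs are below) =====
def Claim_equal_hasAlternatingBits_iter : Prop := ∀ (n : Int), Dom_hasAlternatingBits_iter n → Spec_hasAlternatingBits_iter n (hasAlternatingBits_iter n)

-- ===== LEMMAS AND PROOFS =====

lemma pvShift1 (n : Int) : n >>> (1 : Nat) = n / 2 := by
  simpa using Int.shiftRight_eq_div_pow n 1

-- the loop state's measure strictly drops at every iteration
lemma pvMeas_dec (prev n : Int) (h0 : n ≠ 0) (h1 : PySem.Int.band n 1 ≠ prev) :
    pvMeasA (PySem.Int.band n 1) (n >>> (1 : Nat)) < pvMeasA prev n := by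
  rw [pvShift1]
  rw [PySem.Int.band_one, PySem.Int.mod_eq_emod_of_pos (by omega)] at h1 ⊢
  unfold pvMeasA
  split_ifs <;> omega

-- A's loop returns False on every negative n (n >> 1 stays negative; at -1 the bit 1 repeats).
lemma pvLoopA_neg : ∀ (fuel : Nat) (prev n : Int), n < 0 → pvMeasA prev n < fuel →
    pvLoopA fuel prev n = false := by
  intro fuel
  induction fuel with
  | zero => intro prev n _ hf; omega
  | succ f ih =>
    intro prev n hneg hf
    have h0 : n ≠ 0 := by omega
    rw [pvLoopA]
    rw [if_neg h0]
    by_cases h1 : PySem.Int.band n 1 = prev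
    · rw [if_pos h1]
    · rw [if_neg h1]
      exact ih _ _ (by rw [pvShift1]; omega)
        (by have := pvMeas_dec prev n h0 h1; omega)

-- The value B computes on a natural number, written over Nat.
def pvTrickN (m : Nat) : Bool := (m ^^^ (m >>> 1)) &&& ((m ^^^ (m >>> 1)) + 1) == 0

lemma pvBitXor (a c : Nat) (b d : Bool) :
    (2 * a + b.toNat) ^^^ (2 * c + d.toNat) = 2 * (a ^^^ c) + (b != d).toNat := by
  simpa [Nat.bit_val, Nat.mul_comm] using Nat.xor_bit b a d c

lemma pvBitAnd (a c : Nat) (b d : Bool) :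
    (2 * a + b.toNat) &&& (2 * c + d.toNat) = 2 * (a &&& c) + (b && d).toNat := by
  simpa [Nat.bit_val, Nat.mul_comm] using Nat.land_bit b a d c

-- an even x fails the x & (x+1) test unless x = 0
lemma pvEvenTrick (y : Nat) (hy : y ≠ 0) : ((2 * y) &&& (2 * y + 1) == 0) = false := by
  have hAnd : (2 * y) &&& (2 * y + 1) = 2 * (y &&& y) := by
    simpa using pvBitAnd y y false true
  rw [hAnd, Nat.and_self]
  simp [hy]


-- an odd x passes the x & (x+1) test iff its upper part does
lemma pvOddTrick (y : Nat) : ((2 * y + 1) &&& (2 * y + 1 + 1) == 0) = (y &&& (y + 1) == 0) := by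
  have hAnd : (2 * y + 1) &&& (2 * (y + 1)) = 2 * (y &&& (y + 1)) := by
    simpa using pvBitAnd y (y + 1) true false
  rw [show 2 * y + 1 + 1 = 2 * (y + 1) by omega, hAnd]
  cases h : (y &&& (y + 1) == 0) <;> simp_all

-- One unrolling of the x & (x+1) trick along the low bit, on explicit bits.
lemma pvTrick_aux (q2 : Nat) (b0 b1 : Bool) (h : 1 ≤ 2 * (2 * q2 + b1.toNat) + b0.toNat) :
    pvTrickN (2 * (2 * q2 + b1.toNat) + b0.toNat)
      = ((b0 != b1) && pvTrickN (2 * q2 + b1.toNat)) := by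
  have hd1 : (2 * (2 * q2 + b1.toNat) + b0.toNat) / 2 = 2 * q2 + b1.toNat := by
    cases b0 <;> simp only [Bool.toNat_false, Bool.toNat_true] <;> omega
  have hd2 : (2 * q2 + b1.toNat) / 2 = q2 := by
    cases b1 <;> simp only [Bool.toNat_false, Bool.toNat_true] <;> omega
  unfold pvTrickN
  rw [Nat.shiftRight_one, Nat.shiftRight_one, hd1, hd2]
  rw [pvBitXor (2 * q2 + b1.toNat) q2 b0 b1]
  cases b0 <;> cases b1 <;>
    simp only [bne, Bool.toNat_false, Bool.toNat_true, Nat.add_zero] <;>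
    simp only [Bool.toNat_false, Bool.toNat_true, Nat.add_zero] at h
  · exact pvEvenTrick _ (fun h0 => by
      have h1 := Nat.xor_eq_zero_iff.mp h0; omega)
  · exact pvOddTrick _
  · exact pvOddTrick _
  · exact pvEvenTrick _ (fun h0 => by
      have h1 := Nat.xor_eq_zero_iff.mp h0; omega)

-- One unrolling of the trick: m passes iff its two lowest bits differ and m // 2 passes.
lemma pvTrick_step (m : Nat) (hm : 1 ≤ m) :
    pvTrickN m = ((decide (m % 2 = 1) != decide (m / 2 % 2 = 1)) && pvTrickN (m / 2)) := by
  have h2 : m / 2 = 2 * (m / 2 / 2) + (decide (m / 2 % 2 = 1)).toNat := by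
    rcases Nat.mod_two_eq_zero_or_one (m / 2) with h | h <;> simp [h] <;> omega
  have h0 : m = 2 * (2 * (m / 2 / 2) + (decide (m / 2 % 2 = 1)).toNat) + (decide (m % 2 = 1)).toNat := by
    rw [← h2]
    rcases Nat.mod_two_eq_zero_or_one m with h | h <;> simp [h] <;> omega
  conv_lhs => rw [h0]
  rw [pvTrick_aux (m / 2 / 2) (decide (m % 2 = 1)) (decide (m / 2 % 2 = 1)) (by rw [← h0]; exact hm)]
  rw [← h2]

lemma pvShiftCast (m : Nat) : ((m : Int) >>> (1 : Nat)) = ((m / 2 : Nat) : Int) := by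
  rw [pvShift1, ← PySem.Int.floordiv_eq_ediv_of_pos (by norm_num : (0:Int) < 2)]
  exact_mod_cast PySem.Int.floordiv_natCast m 2

lemma pvBandCast1 (m : Nat) : PySem.Int.band (m : Int) 1 = ((m % 2 : Nat) : Int) := by
  have h : PySem.Int.band (m : Int) ((1 : Nat) : Int) = ((m &&& 1 : Nat) : Int) :=
    PySem.Int.band_natCast m 1
  simpa [Nat.and_one_is_mod] using h

-- A's loop computes exactly B's trick on natural inputs (split as low bit / rest).
lemma pvLoopA_nat : ∀ m fuel : Nat, pvMeasA ((m % 2 : Nat) : Int) ((m / 2 : Nat) : Int) < fuel →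
    pvLoopA fuel ((m % 2 : Nat) : Int) ((m / 2 : Nat) : Int) = pvTrickN m := by
  intro m
  induction m using Nat.strong_induction_on with
  | _ m ih =>
    intro fuel hf
    obtain ⟨f, rfl⟩ : ∃ f, fuel = f + 1 := ⟨fuel - 1, by omega⟩
    rw [pvLoopA]
    by_cases h1 : m ≤ 1
    · interval_cases m <;> simp [pvTrickN]
    · have hm2 : 2 ≤ m := by
        omega
      have hne : ¬ ((m / 2 : Nat) : Int) = 0 := by
        have : 1 ≤ m / 2 := by omega
        exact_mod_cast by omega
      rw [if_neg hne, pvBandCast1, pvShiftCast]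
      by_cases heq : (m / 2) % 2 = m % 2
      · rw [if_pos (by exact_mod_cast heq)]
        rw [pvTrick_step m (by omega)]
        have hd : (decide (m % 2 = 1) != decide (m / 2 % 2 = 1)) = false := by
          simp [heq]
        simp [hd]
      · have hbne : ¬ PySem.Int.band ((m / 2 : Nat) : Int) 1 = ((m % 2 : Nat) : Int) := by
          rw [pvBandCast1]
          exact_mod_cast heq
        have hmeas := pvMeas_dec ((m % 2 : Nat) : Int) ((m / 2 : Nat) : Int) hne hbne
        rw [pvBandCast1, pvShiftCast] at hmeas
        rw [if_neg (by exact_mod_cast heq)]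
        rw [ih (m / 2) (by omega) f (by omega)]
        rw [pvTrick_step m (by omega)]
        have hd : (decide (m % 2 = 1) != decide (m / 2 % 2 = 1)) = true := by
          rcases Nat.mod_two_eq_zero_or_one m with h | h <;>
            rcases Nat.mod_two_eq_zero_or_one (m / 2) with h' | h' <;> simp_all
        simp [hd]

-- ===== VERDICT (by name: the statement is the Claim_ definition above) =====
theorem hasAlternatingBits_iter_spec : Claim_equal_hasAlternatingBits_iter := by
  intro n _dom
  unfold Spec_hasAlternatingBits_iter hasAlternatingBits_iter hasAlternatingBits_iter_alt
  by_cases hn : n < 0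
  · rw [if_pos hn]
    exact pvLoopA_neg _ _ _ (by rw [pvShift1]; omega) (by omega)
  · rw [if_neg hn]
    obtain ⟨m, rfl⟩ : ∃ m : Nat, n = (m : Int) := ⟨n.toNat, by omega⟩
    show pvLoopA _ (PySem.Int.band (m : Int) 1) ((m : Int) >>> (1 : Nat)) =
      (PySem.Int.band (PySem.Int.bxor (m : Int) ((m : Int) >>> (1 : Nat)))
        (PySem.Int.bxor (m : Int) ((m : Int) >>> (1 : Nat)) + 1) == 0)
    rw [pvBandCast1, pvShiftCast, pvLoopA_nat m _ (by omega), PySem.Int.bxor_natCast]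
    have hx : PySem.Int.band ((m ^^^ m / 2 : Nat) : Int) (((m ^^^ m / 2 : Nat) : Int) + 1)
        = (((m ^^^ m / 2) &&& ((m ^^^ m / 2) + 1) : Nat) : Int) := by
      simpa using PySem.Int.band_natCast (m ^^^ m / 2) ((m ^^^ m / 2) + 1)
    rw [hx]
    unfold pvTrickN
    rw [Nat.shiftRight_one]
    cases h : ((m ^^^ m / 2) &&& (m ^^^ m / 2 + 1) == 0) <;> simp_all
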